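-- pv_equiv track=rewrite | github.com/Hitayu12/Datathon_S26 | app.py | _humanize_gap_terms
-- ===== SOURCE A (Python) =====
-- def _humanize_gap_terms(text: str) -> str:
--     out = str(text or "")
--     replacements = {
--         "debt_to_equity_gap": "debt-to-equity gap",
--         "current_ratio_gap": "liquidity buffer gap (current ratio)",
--         "revenue_growth_gap": "revenue growth gap",
--         "cash_burn_gap": "cash burn gap",
--     }
--     for old, new in replacements.items():
--         out = out.replace(old, new)
--     return out
-- ===== SOURCE B (Python) =====
-- _GAP_PHRASES = (
--     ("debt_to_equity_gap", "debt-to-equity gap"),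
--     ("current_ratio_gap", "liquidity buffer gap (current ratio)"),
--     ("revenue_growth_gap", "revenue growth gap"),
--     ("cash_burn_gap", "cash burn gap"),
-- )
--
-- def _humanize_gap_terms(text: str) -> str:
--     s = str(text or "")
--     pieces = []
--     i = 0
--     while i < len(s):
--         for term, phrase in _GAP_PHRASES:
--             if s.startswith(term, i):
--                 pieces.append(phrase)
--                 i += len(term)
--                 break
--         else:
--             pieces.append(s[i])
--             i += 1
--     return "".join(pieces)
-- ===== Notes on version B (the rewrite author's own statement) =====
-- stated objective: alternative
-- what changed: Replaces A's four sequential full-string str.replace passes by one left-to-right scan that tries the four keys at each position and emits the replacement (or the character) as it goes; correct because no key or replacement overlaps another key.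
import Mathlib
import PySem

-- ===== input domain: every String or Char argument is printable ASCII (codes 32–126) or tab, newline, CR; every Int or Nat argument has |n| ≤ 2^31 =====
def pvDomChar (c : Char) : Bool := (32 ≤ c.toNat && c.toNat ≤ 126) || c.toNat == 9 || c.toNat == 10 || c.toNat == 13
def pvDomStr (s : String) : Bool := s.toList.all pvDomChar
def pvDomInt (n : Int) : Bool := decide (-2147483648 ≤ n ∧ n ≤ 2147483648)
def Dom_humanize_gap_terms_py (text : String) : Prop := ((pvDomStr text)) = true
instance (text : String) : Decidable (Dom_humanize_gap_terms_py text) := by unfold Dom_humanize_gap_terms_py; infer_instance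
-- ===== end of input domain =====

-- B replaces A's four sequential full-string replace passes by one left-to-right scan
-- trying the four keys at each position (objective: alternative single-pass algorithm).

-- ===== PORT A =====
-- A: `str(text or "")` is the identity on a str argument (if text = "" then "" or "" is "");
-- then one full-string replace pass per dict item, in insertion order.
def pvReplacements : List (String × String) :=
  [("debt_to_equity_gap", "debt-to-equity gap"),
   ("current_ratio_gap", "liquidity buffer gap (current ratio)"),
   ("revenue_growth_gap", "revenue growth gap"),
   ("cash_burn_gap", "cash burn gap")]

def humanize_gap_terms_py (text : String) : String :=
  let out := text
  pvReplacements.foldl (fun out p => PySem.Str.replace out p.1 p.2) out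

-- ===== PORT B =====
-- the four (key, replacement) pairs of Source B's dict, in order
def pvK1 : List Char := "debt_to_equity_gap".toList
def pvR1 : List Char := "debt-to-equity gap".toList
def pvK2 : List Char := "current_ratio_gap".toList
def pvR2 : List Char := "liquidity buffer gap (current ratio)".toList
def pvK3 : List Char := "revenue_growth_gap".toList
def pvR3 : List Char := "revenue growth gap".toList
def pvK4 : List Char := "cash_burn_gap".toList
def pvR4 : List Char := "cash burn gap".toList

-- Source B's while loop: at position i try each key (out.startswith(old, i)); on a hit append
-- the replacement and jump past the key, otherwise append the character and advance by one.
def pvScanB (l : List Char) : List Char :=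
  match l with
  | [] => []
  | c :: t =>
    if pvK1.isPrefixOf (c :: t) then pvR1 ++ pvScanB (t.drop (pvK1.length - 1))
    else if pvK2.isPrefixOf (c :: t) then pvR2 ++ pvScanB (t.drop (pvK2.length - 1))
    else if pvK3.isPrefixOf (c :: t) then pvR3 ++ pvScanB (t.drop (pvK3.length - 1))
    else if pvK4.isPrefixOf (c :: t) then pvR4 ++ pvScanB (t.drop (pvK4.length - 1))
    else c :: pvScanB t
termination_by l.length
decreasing_by
  all_goals simp only [List.length_cons, List.length_drop]
  all_goals omega

def humanize_gap_terms_py_alt (text : String) : String :=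
  String.ofList (pvScanB text.toList)

-- ===== PRECONDITION & SPEC =====
def Spec_humanize_gap_terms_py (text : String) (out : String) : Prop := out = humanize_gap_terms_py_alt text
instance (text : String) (out : String) : Decidable (Spec_humanize_gap_terms_py text out) := by unfold Spec_humanize_gap_terms_py; infer_instance

-- ===== CLAIM (what is proved, stated in full; the proofs are below) =====
def Claim_equal_humanize_gap_terms_py : Prop := ∀ (text : String), Dom_humanize_gap_terms_py text → Spec_humanize_gap_terms_py text (humanize_gap_terms_py text)

-- ===== LEMMAS AND PROOFS =====

-- natural recursion computing one replace pass (characterizes PySem.Chars.replace for old ≠ [])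
def pvPass (old new : List Char) (l : List Char) : List Char :=
  match l with
  | [] => []
  | c :: t =>
    if old.isPrefixOf (c :: t) then new ++ pvPass old new (t.drop (old.length - 1))
    else c :: pvPass old new t
termination_by l.length
decreasing_by
  all_goals simp only [List.length_cons, List.length_drop]
  all_goals omega

-- the composite of A's four passes, on char lists
def pvComp (l : List Char) : List Char :=
  pvPass pvK4 pvR4 (pvPass pvK3 pvR3 (pvPass pvK2 pvR2 (pvPass pvK1 pvR1 l)))

-- "no nonempty suffix of r is prefix-compatible with k": no k-occurrence can start inside r
abbrev pvCond (r k : List Char) : Prop :=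
  ∀ b ∈ r.tails, b = [] ∨ (¬ b <+: k ∧ ¬ k <+: b)

lemma pv_prefix_append_cases {k b x : List Char} (h : k <+: b ++ x) : k <+: b ∨ b <+: k := by
  obtain ⟨r, hr⟩ := h
  rcases List.append_eq_append_iff.mp hr with ⟨a', ha, _⟩ | ⟨c', hc, _⟩
  · exact Or.inl ⟨a', ha.symm⟩
  · exact Or.inr ⟨c', hc.symm⟩

lemma pvPass_go_eq (old new : List Char) (ho : old ≠ []) :
    ∀ fuel l acc, l.length ≤ fuel →
      PySem.Chars.replace.go old new fuel l acc = acc.reverse ++ pvPass old new l := by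
  intro fuel
  induction fuel with
  | zero =>
      intro l acc hl
      have : l = [] := List.eq_nil_of_length_eq_zero (Nat.le_zero.mp hl)
      subst this
      simp [PySem.Chars.replace.go, pvPass]
  | succ n ih =>
      intro l acc hl
      match l with
      | [] => simp [PySem.Chars.replace.go, pvPass]
      | c :: t =>
        rw [PySem.Chars.replace.go]
        by_cases hp : old.isPrefixOf (c :: t)
        · rw [if_pos hp]
          have hlen : 1 ≤ old.length := by
            cases old with
            | nil => exact absurd rfl ho
            | cons _ _ => simp
          have hdrop : List.drop old.length (c :: t) = t.drop (old.length - 1) := by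
            obtain ⟨m, hm⟩ : ∃ m, old.length = m + 1 :=
              ⟨old.length - 1, (Nat.succ_pred_eq_of_pos hlen).symm⟩
            rw [hm]; simp
          rw [hdrop, ih _ _ (by
            simp only [List.length_cons] at hl
            rw [List.length_drop]
            omega)]
          rw [pvPass, if_pos hp]
          simp
        · rw [if_neg hp]
          rw [ih _ _ (by simp only [List.length_cons] at hl; omega)]
          rw [pvPass, if_neg hp]
          simp

lemma pv_replace_eq (old new s : List Char) (ho : old ≠ []) :
    PySem.Chars.replace s old new = pvPass old new s := by
  rw [PySem.Chars.replace, if_neg (by simpa [List.isEmpty_iff] using ho)]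
  simpa using pvPass_go_eq old new ho s.length s [] (le_refl _)

-- a pass steps over r untouched when no k-occurrence can start inside r
lemma pvPass_skip (k ρ : List Char) :
    ∀ r, pvCond r k → ∀ x, pvPass k ρ (r ++ x) = r ++ pvPass k ρ x := by
  intro r
  induction r with
  | nil => intro _ x; simp
  | cons c r' ih =>
      intro H x
      have hself := H (c :: r') (by simp [List.mem_tails])
      have hself' : ¬ (c :: r') <+: k ∧ ¬ k <+: (c :: r') := by
        rcases hself with h | h
        · exact absurd h (by simp)
        · exact h
      have hnp : ¬ k.isPrefixOf (c :: (r' ++ x)) := by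
        rw [List.isPrefixOf_iff_prefix]
        intro hk
        rcases pv_prefix_append_cases (b := c :: r') (x := x) hk with h | h
        · exact hself'.2 h
        · exact hself'.1 h
      have H' : pvCond r' k := by
        intro b hb
        exact H b (by simp only [List.tails_cons, List.mem_cons]; exact Or.inr hb)
      show pvPass k ρ (c :: (r' ++ x)) = (c :: r') ++ pvPass k ρ x
      rw [pvPass, if_neg hnp, ih H' x]
      rfl

-- a pass consumes k at the head
lemma pvPass_consume (k ρ : List Char) (hk : k ≠ []) (x : List Char) :
    pvPass k ρ (k ++ x) = ρ ++ pvPass k ρ x := by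
  match k, hk with
  | a :: k', _ =>
    show pvPass (a :: k') ρ (a :: (k' ++ x)) = ρ ++ pvPass (a :: k') ρ x
    rw [pvPass, if_pos (by rw [List.isPrefixOf_iff_prefix]; exact ⟨x, rfl⟩)]
    have hd : (k' ++ x).drop ((a :: k').length - 1) = x := by
      simp
    rw [hd]

-- a pass cannot create a new occurrence of a later key K (suffixes of K are incompatible with ρ)
lemma pvPass_nocreate (k ρ K : List Char) (H : pvCond K ρ) :
    ∀ n l b, l.length ≤ n → b ∈ K.tails → b <+: pvPass k ρ l → b <+: l := by
  intro n
  induction n with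
  | zero =>
      intro l b hl _ hb
      have : l = [] := List.eq_nil_of_length_eq_zero (Nat.le_zero.mp hl)
      subst this
      rw [pvPass] at hb
      rw [List.prefix_nil.mp hb]
  | succ n ih =>
      intro l b hl hbK hb
      match l with
      | [] =>
          rw [pvPass] at hb
          rw [List.prefix_nil.mp hb]
      | c :: t =>
          by_cases hp : k.isPrefixOf (c :: t)
          · rw [pvPass, if_pos hp] at hb
            match b with
            | [] => exact List.nil_prefix
            | b0 :: b' =>
                rcases pv_prefix_append_cases hb with h | h
                · rcases H (b0 :: b') hbK with h' | h'
                  · exact absurd h' (by simp)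
                  · exact absurd h h'.1
                · rcases H (b0 :: b') hbK with h' | h'
                  · exact absurd h' (by simp)
                  · exact absurd h h'.2
          · rw [pvPass, if_neg hp] at hb
            match b with
            | [] => exact List.nil_prefix
            | b0 :: b' =>
                rw [List.cons_prefix_cons] at hb
                have hb'K : b' ∈ K.tails := by
                  rw [List.mem_tails] at hbK ⊢
                  exact (List.suffix_cons b0 b').trans hbK
                have := ih t b' (by simp only [List.length_cons] at hl; omega) hb'K hb.2
                rw [List.cons_prefix_cons]
                exact ⟨hb.1, this⟩

-- a pass cannot make a later key K appear at the head of c :: (passed t)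
lemma pv_step_nocreate (k ρ K : List Char) (H : pvCond K ρ) (c : Char) (t : List Char)
    (hK : ¬ K <+: c :: t) : ¬ K <+: c :: pvPass k ρ t := by
  intro h
  match K with
  | [] => exact hK List.nil_prefix
  | k0 :: K' =>
      rw [List.cons_prefix_cons] at h
      have hK' : K' ∈ (k0 :: K').tails := by
        rw [List.mem_tails]; exact List.suffix_cons k0 K'
      have := pvPass_nocreate k ρ (k0 :: K') H t.length t K' (le_refl _) hK' h.2
      exact hK (List.cons_prefix_cons.mpr ⟨h.1, this⟩)

-- helper to rewrite one matched-key case of the main induction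
lemma pv_drop_of_prefix {K : List Char} {c : Char} {t x : List Char}
    (hx : K ++ x = c :: t) (hlen : 1 ≤ K.length) : x = t.drop (K.length - 1) := by
  obtain ⟨m, hm⟩ : ∃ m, K.length = m + 1 := ⟨K.length - 1, (Nat.succ_pred_eq_of_pos hlen).symm⟩
  have : List.drop K.length (K ++ x) = List.drop K.length (c :: t) := by rw [hx]
  rw [List.drop_left] at this
  rw [this, hm]
  simp

lemma pvScanB_cons (c : Char) (t : List Char) :
    pvScanB (c :: t) =
      if pvK1.isPrefixOf (c :: t) then pvR1 ++ pvScanB (t.drop (pvK1.length - 1))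
      else if pvK2.isPrefixOf (c :: t) then pvR2 ++ pvScanB (t.drop (pvK2.length - 1))
      else if pvK3.isPrefixOf (c :: t) then pvR3 ++ pvScanB (t.drop (pvK3.length - 1))
      else if pvK4.isPrefixOf (c :: t) then pvR4 ++ pvScanB (t.drop (pvK4.length - 1))
      else c :: pvScanB t := by
  rw [pvScanB.eq_def]

lemma pvComp_eq_scanB : ∀ n l, l.length ≤ n → pvComp l = pvScanB l := by
  intro n
  induction n with
  | zero =>
      intro l hl
      have : l = [] := List.eq_nil_of_length_eq_zero (Nat.le_zero.mp hl)
      subst this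
      simp [pvComp, pvPass, pvScanB]
  | succ n ih =>
      intro l hl
      match l with
      | [] => simp [pvComp, pvPass, pvScanB]
      | c :: t =>
        simp only [List.length_cons] at hl
        by_cases h1 : pvK1.isPrefixOf (c :: t)
        · obtain ⟨x, hx⟩ := List.isPrefixOf_iff_prefix.mp h1
          have hxd : x = t.drop (pvK1.length - 1) := pv_drop_of_prefix hx (by decide)
          have hxlen : x.length ≤ n := by
            have : pvK1.length + x.length = t.length + 1 := by
              have := congrArg List.length hx; simpa using this
            have h18 : pvK1.length = 18 := by decide
            omega
          rw [pvComp, ← hx,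
            pvPass_consume pvK1 pvR1 (by decide) x,
            pvPass_skip pvK2 pvR2 pvR1 (by decide),
            pvPass_skip pvK3 pvR3 pvR1 (by decide),
            pvPass_skip pvK4 pvR4 pvR1 (by decide)]
          rw [hx, pvScanB_cons, if_pos h1, ← hxd]
          exact congrArg (pvR1 ++ ·) (ih x hxlen)
        · by_cases h2 : pvK2.isPrefixOf (c :: t)
          · obtain ⟨x, hx⟩ := List.isPrefixOf_iff_prefix.mp h2
            have hxd : x = t.drop (pvK2.length - 1) := pv_drop_of_prefix hx (by decide)
            have hxlen : x.length ≤ n := by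
              have : pvK2.length + x.length = t.length + 1 := by
                have := congrArg List.length hx; simpa using this
              have h17 : pvK2.length = 17 := by decide
              omega
            rw [pvComp, ← hx,
              pvPass_skip pvK1 pvR1 pvK2 (by decide),
              pvPass_consume pvK2 pvR2 (by decide),
              pvPass_skip pvK3 pvR3 pvR2 (by decide),
              pvPass_skip pvK4 pvR4 pvR2 (by decide)]
            rw [hx, pvScanB_cons, if_neg h1, if_pos h2, ← hxd]
            exact congrArg (pvR2 ++ ·) (ih x hxlen)
          · by_cases h3 : pvK3.isPrefixOf (c :: t)
            · obtain ⟨x, hx⟩ := List.isPrefixOf_iff_prefix.mp h3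
              have hxd : x = t.drop (pvK3.length - 1) := pv_drop_of_prefix hx (by decide)
              have hxlen : x.length ≤ n := by
                have : pvK3.length + x.length = t.length + 1 := by
                  have := congrArg List.length hx; simpa using this
                have h18 : pvK3.length = 18 := by decide
                omega
              rw [pvComp, ← hx,
                pvPass_skip pvK1 pvR1 pvK3 (by decide),
                pvPass_skip pvK2 pvR2 pvK3 (by decide),
                pvPass_consume pvK3 pvR3 (by decide),
                pvPass_skip pvK4 pvR4 pvR3 (by decide)]
              rw [hx, pvScanB_cons, if_neg h1, if_neg h2, if_pos h3, ← hxd]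
              exact congrArg (pvR3 ++ ·) (ih x hxlen)
            · by_cases h4 : pvK4.isPrefixOf (c :: t)
              · obtain ⟨x, hx⟩ := List.isPrefixOf_iff_prefix.mp h4
                have hxd : x = t.drop (pvK4.length - 1) := pv_drop_of_prefix hx (by decide)
                have hxlen : x.length ≤ n := by
                  have : pvK4.length + x.length = t.length + 1 := by
                    have := congrArg List.length hx; simpa using this
                  have h13 : pvK4.length = 13 := by decide
                  omega
                rw [pvComp, ← hx,
                  pvPass_skip pvK1 pvR1 pvK4 (by decide),
                  pvPass_skip pvK2 pvR2 pvK4 (by decide),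
                  pvPass_skip pvK3 pvR3 pvK4 (by decide),
                  pvPass_consume pvK4 pvR4 (by decide)]
                rw [hx, pvScanB_cons, if_neg h1, if_neg h2, if_neg h3, if_pos h4, ← hxd]
                exact congrArg (pvR4 ++ ·) (ih x hxlen)
              · -- no key matches at this position: every pass keeps c and none creates a match
                have h1' : ¬ pvK1 <+: c :: t := fun h => h1 (List.isPrefixOf_iff_prefix.mpr h)
                have h2' : ¬ pvK2 <+: c :: t := fun h => h2 (List.isPrefixOf_iff_prefix.mpr h)
                have h3' : ¬ pvK3 <+: c :: t := fun h => h3 (List.isPrefixOf_iff_prefix.mpr h)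
                have h4' : ¬ pvK4 <+: c :: t := fun h => h4 (List.isPrefixOf_iff_prefix.mpr h)
                have s1 : pvPass pvK1 pvR1 (c :: t) = c :: pvPass pvK1 pvR1 t := by
                  rw [pvPass, if_neg h1]
                have n2 : ¬ pvK2 <+: c :: pvPass pvK1 pvR1 t :=
                  pv_step_nocreate pvK1 pvR1 pvK2 (by decide) c t h2'
                have s2 : pvPass pvK2 pvR2 (c :: pvPass pvK1 pvR1 t)
                    = c :: pvPass pvK2 pvR2 (pvPass pvK1 pvR1 t) := by
                  rw [pvPass, if_neg (fun h => n2 (List.isPrefixOf_iff_prefix.mp h))]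
                have n3 : ¬ pvK3 <+: c :: pvPass pvK2 pvR2 (pvPass pvK1 pvR1 t) :=
                  pv_step_nocreate pvK2 pvR2 pvK3 (by decide) c _
                    (pv_step_nocreate pvK1 pvR1 pvK3 (by decide) c t h3')
                have s3 : pvPass pvK3 pvR3 (c :: pvPass pvK2 pvR2 (pvPass pvK1 pvR1 t))
                    = c :: pvPass pvK3 pvR3 (pvPass pvK2 pvR2 (pvPass pvK1 pvR1 t)) := by
                  rw [pvPass, if_neg (fun h => n3 (List.isPrefixOf_iff_prefix.mp h))]
                have n4 : ¬ pvK4 <+: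
                    c :: pvPass pvK3 pvR3 (pvPass pvK2 pvR2 (pvPass pvK1 pvR1 t)) :=
                  pv_step_nocreate pvK3 pvR3 pvK4 (by decide) c _
                    (pv_step_nocreate pvK2 pvR2 pvK4 (by decide) c _
                      (pv_step_nocreate pvK1 pvR1 pvK4 (by decide) c t h4'))
                have s4 : pvPass pvK4 pvR4
                      (c :: pvPass pvK3 pvR3 (pvPass pvK2 pvR2 (pvPass pvK1 pvR1 t)))
                    = c :: pvPass pvK4 pvR4
                      (pvPass pvK3 pvR3 (pvPass pvK2 pvR2 (pvPass pvK1 pvR1 t))) := by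
                  rw [pvPass, if_neg (fun h => n4 (List.isPrefixOf_iff_prefix.mp h))]
                rw [pvComp, s1, s2, s3, s4]
                rw [pvScanB_cons, if_neg h1, if_neg h2, if_neg h3, if_neg h4]
                exact congrArg (c :: ·) (ih t (by omega))

lemma pvA_eq_comp (text : String) :
    humanize_gap_terms_py text = String.ofList (pvComp text.toList) := by
  show PySem.Str.replace (PySem.Str.replace (PySem.Str.replace (PySem.Str.replace text
      "debt_to_equity_gap" "debt-to-equity gap") "current_ratio_gap"
      "liquidity buffer gap (current ratio)") "revenue_growth_gap" "revenue growth gap")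
      "cash_burn_gap" "cash burn gap" = String.ofList (pvComp text.toList)
  simp only [PySem.Str.replace, String.toList_ofList]
  rw [pv_replace_eq _ _ _ (by decide), pv_replace_eq _ _ _ (by decide),
    pv_replace_eq _ _ _ (by decide), pv_replace_eq _ _ _ (by decide)]
  rfl

-- ===== VERDICT (by name: the statement is the Claim_ definition above) =====
theorem humanize_gap_terms_py_spec : Claim_equal_humanize_gap_terms_py := by
  intro text _
  show humanize_gap_terms_py text = humanize_gap_terms_py_alt text
  rw [pvA_eq_comp, humanize_gap_terms_py_alt,
    pvComp_eq_scanB text.toList.length text.toList (le_refl _)]
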